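-- pv_equiv track=rewrite | github.com/aizpurua23a/aoc21 | 12/12.py | has_no_repeated_small_cave
-- ===== SOURCE A (Python) =====
-- def has_no_repeated_small_cave(path, one_repeated=False):
--     small_caves = set()
--     one_repeated_cave = False
--     for node_name in path:
--         if node_name.islower() and node_name in small_caves:
--             if one_repeated and not one_repeated_cave and node_name not in ('start', 'end'):
--                 one_repeated_cave = True
--                 continue
--             return False
--         if node_name.islower():
--             small_caves.add(node_name)
--     return True
-- ===== SOURCE B (Python) =====
-- def has_no_repeated_small_cave(path, one_repeated=False):
--     counts = {}
--     for n in path: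
--         if n.islower():
--             counts[n] = counts.get(n, 0) + 1
--     if counts.get('start', 0) > 1 or counts.get('end', 0) > 1:
--         return False
--     repeats = sum(c - 1 for c in counts.values())
--     return repeats <= (1 if one_repeated else 0)
-- ===== Notes on version B (the rewrite author's own statement) =====
-- stated objective: simpler
-- what changed: B replaces A's streaming set + one-repeat flag + early returns with a single build-then-aggregate pass: it builds a frequency table of lowercase caves, rejects a repeated start/end, and compares the total number of extra occurrences against the allowed budget.
import Mathlib
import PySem

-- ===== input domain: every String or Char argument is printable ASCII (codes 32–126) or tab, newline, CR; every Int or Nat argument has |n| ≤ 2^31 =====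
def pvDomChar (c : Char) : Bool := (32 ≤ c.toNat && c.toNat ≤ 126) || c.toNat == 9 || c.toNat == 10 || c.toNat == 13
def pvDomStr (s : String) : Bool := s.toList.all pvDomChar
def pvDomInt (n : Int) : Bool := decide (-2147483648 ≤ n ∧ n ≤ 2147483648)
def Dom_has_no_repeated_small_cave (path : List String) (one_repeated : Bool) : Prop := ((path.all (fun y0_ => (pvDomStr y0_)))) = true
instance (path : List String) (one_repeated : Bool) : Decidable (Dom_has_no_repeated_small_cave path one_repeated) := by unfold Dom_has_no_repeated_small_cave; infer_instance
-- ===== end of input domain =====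

-- B replaces A's streaming set + one-repeat flag + early returns by one frequency table built
-- first and then aggregated (total extra occurrences vs. the allowed budget); objective: simpler.

-- Python str.islower(): at least one lowercase letter and no uppercase letter
-- (exact on the printable-ASCII domain, where the cased characters are exactly a-z and A-Z)
def pyStrIslower (s : String) : Bool :=
  (s.toList.any fun c => c.isLower) && !(s.toList.any fun c => c.isUpper)

-- ===== PORT A =====
def hnrscLoop (one_repeated : Bool) : List String → PySem.Set String → Bool → Bool
  | [], _, _ => true
  | node_name :: rest, small_caves, one_repeated_cave =>
    if pyStrIslower node_name && PySem.Set.contains small_caves node_name then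
      if one_repeated && !one_repeated_cave && !(node_name == "start" || node_name == "end") then
        hnrscLoop one_repeated rest small_caves true
      else false
    else
      hnrscLoop one_repeated rest
        (if pyStrIslower node_name then PySem.Set.add small_caves node_name else small_caves)
        one_repeated_cave

def has_no_repeated_small_cave (path : List String) (one_repeated : Bool) : Bool :=
  hnrscLoop one_repeated path PySem.Set.empty false

-- ===== PORT B =====
-- the frequency table 'counts' of Source B
def hnrscCounts (path : List String) : PySem.Dict String Int :=
  path.foldl (fun d n => if pyStrIslower n then d.insert n (d.getD n 0 + 1) else d)
    PySem.Dict.empty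

def has_no_repeated_small_cave_alt (path : List String) (one_repeated : Bool) : Bool :=
  if (hnrscCounts path).getD "start" 0 > 1 || (hnrscCounts path).getD "end" 0 > 1 then false
  else decide (((hnrscCounts path).values.map (fun c => c - 1)).sum ≤ (if one_repeated then 1 else 0))

-- ===== PRECONDITION & SPEC =====
def Spec_has_no_repeated_small_cave (path : List String) (one_repeated : Bool) (out : Bool) : Prop := out = has_no_repeated_small_cave_alt path one_repeated
instance (path : List String) (one_repeated : Bool) (out : Bool) : Decidable (Spec_has_no_repeated_small_cave path one_repeated out) := by unfold Spec_has_no_repeated_small_cave; infer_instance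

-- ===== CLAIM (what is proved, stated in full; the proofs are below) =====
def Claim_equal_has_no_repeated_small_cave : Prop := ∀ (path : List String) (one_repeated : Bool), Dom_has_no_repeated_small_cave path one_repeated → Spec_has_no_repeated_small_cave path one_repeated (has_no_repeated_small_cave path one_repeated)

-- ===== LEMMAS AND PROOFS =====

-- number of loop iterations of A that see an already-recorded small cave ("repeat events")
def ecnt : List String → PySem.Set String → Nat
  | [], _ => 0
  | n :: t, s =>
    if pyStrIslower n && PySem.Set.contains s n then 1 + ecnt t s
    else ecnt t (if pyStrIslower n then PySem.Set.add s n else s)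

-- occurrences of v still to come plus the one possibly already recorded in the set
def scount (t : List String) (s : PySem.Set String) (v : String) : Nat :=
  t.count v + (if PySem.Set.contains s v then 1 else 0)

theorem loop_char_proof (one_repeated : Bool) : ∀ (t : List String) (s : PySem.Set String) (f : Bool),
    hnrscLoop one_repeated t s f =
      (decide (scount t s "start" ≤ 1) && decide (scount t s "end" ≤ 1) &&
       decide (ecnt t s ≤ (if one_repeated && !f then 1 else 0))) := by
  intro t
  induction t with
  | nil =>
    intro s f
    have h1 : decide (scount [] s "start" ≤ 1) = true := by
      simp only [scount, List.count_nil, Nat.zero_add, decide_eq_true_eq]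
      split_ifs <;> omega
    have h2 : decide (scount [] s "end" ≤ 1) = true := by
      simp only [scount, List.count_nil, Nat.zero_add, decide_eq_true_eq]
      split_ifs <;> omega
    have h3 : decide (ecnt [] s ≤ (if one_repeated && !f then 1 else 0)) = true := by
      have : ecnt [] s = 0 := rfl
      rw [this, decide_eq_true_eq]
      omega
    show true = _
    rw [h1, h2, h3]
    rfl
  | cons n t ih =>
    intro s f
    by_cases hc : PySem.Set.contains s n = true
    case pos =>
      by_cases hl : pyStrIslower n = true
      case neg =>
        -- not a small cave: nothing changes
        have hns : n ≠ "start" := by intro h; subst h; exact hl (by decide)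
        have hne : n ≠ "end" := by intro h; subst h; exact hl (by decide)
        have hA : hnrscLoop one_repeated (n :: t) s f = hnrscLoop one_repeated t s f := by
          simp [hnrscLoop, hl]
        have hec : ecnt (n :: t) s = ecnt t s := by simp [ecnt, hl]
        rw [hA, ih, hec]
        simp [scount, List.count_cons_of_ne hns, List.count_cons_of_ne hne]
      case pos =>
      have hmem : n ∈ s := (PySem.Set.contains_iff s n).mp hc
      by_cases hse : (n == "start" || n == "end") = true
      · -- repeated start/end: both sides are false
        have hA : hnrscLoop one_repeated (n :: t) s f = false := by
          simp [hnrscLoop, hl, hmem, hse]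
        rw [hA, eq_comm, Bool.eq_false_iff]
        intro hR
        simp only [Bool.and_eq_true, decide_eq_true_eq] at hR
        obtain ⟨⟨h1, h2⟩, _⟩ := hR
        rcases Bool.or_eq_true_iff.mp hse with h | h
        · have hn : n = "start" := by simpa using h
          subst hn
          simp [scount, List.count_cons_self, hmem] at h1
        · have hn : n = "end" := by simpa using h
          subst hn
          simp [scount, List.count_cons_self, hmem] at h2
      · -- n is an ordinary small cave seen before
        have hns : n ≠ "start" := by intro h; subst h; simp at hse
        have hne : n ≠ "end" := by intro h; subst h; simp at hse
        have hcount : ∀ v, v = "start" ∨ v = "end" → scount (n :: t) s v = scount t s v := by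
          intro v hv
          have : n ≠ v := by rcases hv with h | h <;> subst h <;> assumption
          simp [scount, List.count_cons_of_ne this]
        have hec : ecnt (n :: t) s = 1 + ecnt t s := by simp [ecnt, hl, hmem]
        by_cases hof : (one_repeated && !f) = true
        · have ho : one_repeated = true := by revert hof; cases one_repeated <;> simp
          have hf : f = false := by revert hof; cases f <;> simp
          have hA : hnrscLoop one_repeated (n :: t) s f = hnrscLoop one_repeated t s true := by
            simp [hnrscLoop, hl, hmem, hse, ho, hf]
          rw [hA, ih s true, hcount "start" (Or.inl rfl), hcount "end" (Or.inr rfl), hec]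
          have hb : (if one_repeated && !true then (1 : Nat) else 0) = 0 := by simp
          rw [hb, hof, if_pos rfl]
          congr 1
          rw [decide_eq_decide]
          omega
        · have hA : hnrscLoop one_repeated (n :: t) s f = false := by
            simp [hnrscLoop, hl, hmem]
            intro h1 h2
            exact absurd (by simp [h1, h2]) hof
          have hbud : (if one_repeated && !f then (1 : Nat) else 0) = 0 := by
            simp [Bool.eq_false_iff.mpr hof]
          rw [hA, hbud, hec, eq_comm, Bool.eq_false_iff]
          intro hR
          simp only [Bool.and_eq_true, decide_eq_true_eq] at hR
          omega
    case neg =>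
      by_cases hl : pyStrIslower n = true
      case neg =>
        have hns : n ≠ "start" := by intro h; subst h; exact hl (by decide)
        have hne : n ≠ "end" := by intro h; subst h; exact hl (by decide)
        have hA : hnrscLoop one_repeated (n :: t) s f = hnrscLoop one_repeated t s f := by
          simp [hnrscLoop, hl]
        have hec : ecnt (n :: t) s = ecnt t s := by simp [ecnt, hl]
        rw [hA, ih, hec]
        simp [scount, List.count_cons_of_ne hns, List.count_cons_of_ne hne]
      case pos =>
      -- a new small cave: it is added to the set
      have hmem : n ∉ s := fun h => hc ((PySem.Set.contains_iff s n).mpr h)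
      have hA : hnrscLoop one_repeated (n :: t) s f =
          hnrscLoop one_repeated t (PySem.Set.add s n) f := by
        simp [hnrscLoop, hl, hmem]
      have hec : ecnt (n :: t) s = ecnt t (PySem.Set.add s n) := by simp [ecnt, hl, hmem]
      have hcount : ∀ v, scount (n :: t) s v = scount t (PySem.Set.add s n) v := by
        intro v
        by_cases hv : n = v
        · subst hv
          simp [scount, hmem, List.count_cons_self]
        · have hv' : v ≠ n := fun h => hv h.symm
          simp [scount, List.count_cons_of_ne hv, PySem.Set.mem_add, hv']
      rw [hA, ih, hec, hcount "start", hcount "end"]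

theorem ecnt_len_proof : ∀ (t : List String) (s : PySem.Set String),
    ecnt t s + (PySem.Set.update s (t.filter pyStrIslower)).length =
      (t.filter pyStrIslower).length + s.length := by
  intro t
  induction t with
  | nil => intro s; simp [ecnt, PySem.Set.update]
  | cons n t ih =>
    intro s
    by_cases hl : pyStrIslower n = true
    · rw [List.filter_cons_of_pos hl, PySem.Set.update_cons]
      by_cases hc : PySem.Set.contains s n = true
      · have hmem : n ∈ s := (PySem.Set.contains_iff s n).mp hc
        have hadd : PySem.Set.add s n = s := PySem.Set.add_of_mem hmem
        have hec : ecnt (n :: t) s = 1 + ecnt t s := by simp [ecnt, hl, hmem]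
        rw [hec, hadd]
        have := ih s
        simp only [List.length_cons]
        omega
      · have hmem : n ∉ s := fun h => hc ((PySem.Set.contains_iff s n).mpr h)
        have hadd : PySem.Set.add s n = s ++ [n] := PySem.Set.add_of_not_mem hmem
        have hec : ecnt (n :: t) s = ecnt t (PySem.Set.add s n) := by simp [ecnt, hl, hmem]
        rw [hec]
        have := ih (PySem.Set.add s n)
        rw [hadd] at this ⊢
        simp only [List.length_append, List.length_cons, List.length_nil] at this ⊢
        omega
    · rw [List.filter_cons_of_neg hl]
      have hec : ecnt (n :: t) s = ecnt t s := by simp [ecnt, hl]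
      rw [hec]
      exact ih s

theorem sum_map_sub_int (l : List String) (f g : String → Int) :
    (l.map (fun k => f k - g k)).sum = (l.map f).sum - (l.map g).sum := by
  induction l with
  | nil => simp
  | cons x t ih => simp [ih]; ring

-- ===== VERDICT (by name: the statement is the Claim_ definition above) =====
theorem has_no_repeated_small_cave_spec : Claim_equal_has_no_repeated_small_cave := by
  unfold Claim_equal_has_no_repeated_small_cave
  intro path one_repeated _
  unfold Spec_has_no_repeated_small_cave has_no_repeated_small_cave has_no_repeated_small_cave_alt
  set lows := path.filter pyStrIslower with hlows
  -- the dict B builds is Counter(lows)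
  have hcnts : hnrscCounts path = PySem.Dict.counter lows := by
    rw [hnrscCounts, hlows, ← PySem.Dict.foldl_insert_getD_add_one_eq_counter, List.foldl_filter]
  -- A's loop, characterised
  rw [loop_char_proof one_repeated path PySem.Set.empty false, hcnts]
  -- start/end counts agree between path and lows
  have hcS : List.count "start" lows = List.count "start" path := by
    rw [hlows]; exact List.count_filter (by decide)
  have hcE : List.count "end" lows = List.count "end" path := by
    rw [hlows]; exact List.count_filter (by decide)
  have hsc : ∀ v, scount path PySem.Set.empty v = List.count v path := by
    intro v; simp [scount, PySem.Set.empty, PySem.Set.contains]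
  -- the repeat count: ecnt path ∅ = |lows| - |set(lows)|
  have hlen := ecnt_len_proof path PySem.Set.empty
  simp only [PySem.Set.empty] at hlen
  rw [PySem.Set.update_nil_left] at hlen
  -- B's repeats = |lows| - |set(lows)| as an Int
  have hvals : (PySem.Dict.counter lows).values =
      (PySem.Set.ofList lows).map (fun k => (List.count k lows : Int)) := by
    simp only [PySem.Dict.values, PySem.Dict.items_counter, List.map_map]
    rfl
  have hperm : (PySem.Set.ofList lows).Perm lows.dedup := by
    rw [List.perm_ext_iff_of_nodup (PySem.Set.nodup_ofList lows) lows.nodup_dedup]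
    intro a
    rw [PySem.Set.mem_ofList, List.mem_dedup]
  have hsum : ((PySem.Set.ofList lows).map (fun k => (List.count k lows : Int))).sum =
      (lows.length : Int) := by
    rw [(hperm.map (fun k => (List.count k lows : Int))).sum_eq]
    have : (lows.dedup.map (fun k => (List.count k lows : Int))).sum =
        ((lows.dedup.map (fun k => List.count k lows)).sum : Int) := by
      push_cast
      rw [List.map_map]
      rfl
    rw [this, List.sum_map_count_dedup_eq_length]
  have hrep : ((PySem.Dict.counter lows).values.map (fun c => c - 1)).sum =
      (lows.length : Int) - ((PySem.Set.ofList lows).length : Int) := by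
    rw [hvals, List.map_map]
    have : ((fun c : Int => c - 1) ∘ fun k => (List.count k lows : Int)) =
        fun k => (List.count k lows : Int) - 1 := rfl
    rw [this, sum_map_sub_int, hsum]
    simp
  simp only [PySem.Dict.getD_counter, hrep, hsc, hcS, hcE]
  -- pure arithmetic on the four numbers
  have hE : ecnt path PySem.Set.empty +
      (PySem.Set.ofList (List.filter pyStrIslower path)).length =
      (List.filter pyStrIslower path).length := by
    simpa [PySem.Set.empty] using hlen
  rw [Bool.eq_iff_iff]
  by_cases h1 : List.count "start" path ≤ 1
  · by_cases h2 : List.count "end" path ≤ 1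
    · have hif : (decide ((List.count "start" path : Int) > 1) ||
          decide ((List.count "end" path : Int) > 1)) = false := by
        simp only [Bool.or_eq_false_iff, decide_eq_false_iff_not, not_lt]
        exact ⟨by exact_mod_cast h1, by exact_mod_cast h2⟩
      rw [hif]
      simp only [Bool.false_eq_true, if_false, Bool.and_eq_true, decide_eq_true_eq,
        Bool.not_false, Bool.and_true]
      simp only [hlows] at hE ⊢
      simp only [PySem.Set.empty] at hE
      cases one_repeated <;> simp [h1, h2] <;> omega
    · have hif : (decide ((List.count "start" path : Int) > 1) ||
          decide ((List.count "end" path : Int) > 1)) = true := by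
        have : (1 : Int) < (List.count "end" path : Int) := by exact_mod_cast (by omega : 1 < List.count "end" path)
        simp [this]
      rw [hif]
      simp [h2]
  · have hif : (decide ((List.count "start" path : Int) > 1) ||
        decide ((List.count "end" path : Int) > 1)) = true := by
      have : (1 : Int) < (List.count "start" path : Int) := by exact_mod_cast (by omega : 1 < List.count "start" path)
      simp [this]
    rw [hif]
    simp [h1]
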